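-- pv_equiv track=rewrite | github.com/djshaji/cicada | input/contour.py | dispersion_reduce
-- ===== SOURCE A (Python) =====
-- def dispersion_reduce (dispersion, factor = 1, length = 0, margin = 100):
--     count = 0
--
--     while (count < factor):
--         res = str ()
--         l = len (dispersion)
--         for i in range (l):
--             #if i < l - 1 and dispersion [i + 1] in dispersion_proxima [dispersion [i]]:
--                 #res += dispersion [i]
--             if i % 2 == 0:
--                 res += dispersion [i]
--         dispersion = res
--         #print (l, length)
--         if length and l - length <= margin:
--             break
--         elif not length:
--             count += 1
--
--     return dispersion
-- ===== SOURCE B (Python) =====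
-- def dispersion_reduce(dispersion, factor=1, length=0, margin=100):
--     # Compute the number k of halving passes directly, then take one stride-2**k slice.
--     if factor <= 0:
--         return dispersion
--     n = len(dispersion)
--     if not length:
--         k = factor
--     else:
--         k = 1
--         l = n
--         while l > margin + length:
--             l = (l + 1) // 2
--             k += 1
--     if k >= n.bit_length():
--         return dispersion[:1]
--     return dispersion[::2 ** k]
-- ===== Notes on version B (the rewrite author's own statement) =====
-- stated objective: faster
-- what changed: B computes the number k of halving passes arithmetically (k = factor, or a ceil-halving length countdown when length is truthy) and returns the single slice dispersion[::2**k] instead of rebuilding the string pass by pass.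
import Mathlib
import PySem

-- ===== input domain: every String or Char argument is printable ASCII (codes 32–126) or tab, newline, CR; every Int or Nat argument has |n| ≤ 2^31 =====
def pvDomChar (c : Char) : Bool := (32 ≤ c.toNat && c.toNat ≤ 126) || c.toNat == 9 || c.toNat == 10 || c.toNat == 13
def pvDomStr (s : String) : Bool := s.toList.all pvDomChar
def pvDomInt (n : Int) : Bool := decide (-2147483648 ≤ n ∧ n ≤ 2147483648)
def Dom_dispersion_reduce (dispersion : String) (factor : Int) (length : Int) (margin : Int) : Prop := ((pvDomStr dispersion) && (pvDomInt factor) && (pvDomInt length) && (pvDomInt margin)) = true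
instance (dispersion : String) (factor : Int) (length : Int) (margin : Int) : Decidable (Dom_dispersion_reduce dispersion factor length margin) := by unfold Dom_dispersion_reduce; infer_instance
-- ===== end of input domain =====

-- B replaces A's repeated keep-every-other-character passes by computing the pass count k
-- arithmetically and taking the single slice dispersion[::2**k] (timed faster by the check).

-- ===== PORT A =====
-- one body of A's while loop: res = ''.join of dispersion[i] for even i
def pvPassA (s : List Char) : List Char :=
  (PySem.List.pyRange 0 (s.length : Int) 1).foldl
    (fun res i => if PySem.Int.mod i 2 == 0 then res ++ [PySem.List.pyGetD s i ' '] else res) []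

-- A's while loop; fuel is a totality guard only (Pre_ rules out A's divergent inputs,
-- and on all other inputs the supplied fuel is never exhausted)
def pvLoopA (factor length margin : Int) : Nat → List Char → Int → List Char
  | 0, disp, _ => disp
  | fuel + 1, disp, count =>
    if count < factor then
      let l : Int := (disp.length : Int)
      let res := pvPassA disp
      if length ≠ 0 ∧ l - length ≤ margin then res
      else if length = 0 then pvLoopA factor length margin fuel res (count + 1)
      else pvLoopA factor length margin fuel res count
    else disp

def dispersion_reduce (dispersion : String) (factor : Int) (length : Int) (margin : Int) : String :=
  String.ofList (pvLoopA factor length margin (factor.toNat + dispersion.toList.length + 1) dispersion.toList 0)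

-- ===== PORT B =====
-- B's `while l > margin + length: l = (l+1)//2; k += 1`; fuel is a totality guard only
def pvKLoop (T : Int) : Nat → Nat → Int → Int
  | 0, _, k => k
  | fuel + 1, l, k => if T < (l : Int) then pvKLoop T fuel ((l + 1) / 2) (k + 1) else k

def dispersion_reduce_alt (dispersion : String) (factor : Int) (length : Int) (margin : Int) : String :=
  if factor ≤ 0 then dispersion
  else
    let s := dispersion.toList
    let n := s.length
    let k : Int := if length = 0 then factor else pvKLoop (margin + length) (n + 1) n 1
    if ((PySem.Int.bitLength (n : Int) : Int)) ≤ k then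
      String.ofList (PySem.List.slice s none (some 1))          -- dispersion[:1]
    else
      String.ofList ((PySem.List.slice? s none none ((2 : Int) ^ k.toNat)).getD [])  -- dispersion[::2**k]

-- ===== PRECONDITION & SPEC =====
-- Pre_ excludes exactly the inputs on which A never returns (infinite loop): factor ≥ 1,
-- length truthy and margin + length too small for `l - length <= margin` ever to hold.
def Pre_dispersion_reduce (dispersion : String) (factor : Int) (length : Int) (margin : Int) : Prop :=
  factor ≤ 0 ∨ length = 0 ∨ 1 ≤ margin + length ∨ (dispersion = "" ∧ 0 ≤ margin + length)
instance (dispersion : String) (factor : Int) (length : Int) (margin : Int) : Decidable (Pre_dispersion_reduce dispersion factor length margin) := by unfold Pre_dispersion_reduce; infer_instance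

def pvWitness_dispersion_reduce : String × Int × Int × Int := ("abcdef", 2, 0, 100)

def Spec_dispersion_reduce (dispersion : String) (factor : Int) (length : Int) (margin : Int) (out : String) : Prop := out = dispersion_reduce_alt dispersion factor length margin
instance (dispersion : String) (factor : Int) (length : Int) (margin : Int) (out : String) : Decidable (Spec_dispersion_reduce dispersion factor length margin out) := by unfold Spec_dispersion_reduce; infer_instance

-- ===== CLAIM (what is proved, stated in full; the proofs are below) =====
def Claim_equal_dispersion_reduce : Prop := ∀ (dispersion : String) (factor : Int) (length : Int) (margin : Int), Dom_dispersion_reduce dispersion factor length margin → Pre_dispersion_reduce dispersion factor length margin → Spec_dispersion_reduce dispersion factor length margin (dispersion_reduce dispersion factor length margin)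

-- ===== LEMMAS AND PROOFS =====

-- stride with step m+1: s[0], s[m+1], s[2(m+1)], …
def pvStride (m : Nat) : List Char → List Char
  | [] => []
  | x :: t => x :: pvStride m (t.drop m)
termination_by s => s.length
decreasing_by simp

-- A's pass iterated j times
def pvIter : Nat → List Char → List Char
  | 0, s => s
  | j + 1, s => pvIter j (pvPassA s)

-- specification count of passes in the `length` truthy case (junk value 1 at l = 1, T < 1,
-- which Pre_ excludes)
def pvCnt (T : Int) (l : Nat) : Nat :=
  if (l : Int) ≤ T then 0
  else if l ≤ 1 then 1
  else pvCnt T ((l + 1) / 2) + 1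
termination_by l
decreasing_by omega

theorem pvStride_nil (m : Nat) : pvStride m [] = [] := by rw [pvStride.eq_def]

theorem pvStride_cons (m : Nat) (x : Char) (t : List Char) :
    pvStride m (x :: t) = x :: pvStride m (t.drop m) := by rw [pvStride.eq_def]

theorem pvCnt_eq (T : Int) (l : Nat) :
    pvCnt T l = if (l : Int) ≤ T then 0 else if l ≤ 1 then 1 else pvCnt T ((l + 1) / 2) + 1 := by
  rw [pvCnt.eq_def]

theorem pvStride_drop_one (m : Nat) : ∀ u : List Char, (pvStride 1 u).drop m = pvStride 1 (u.drop (2 * m)) := by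
  induction m with
  | zero => intro u; simp
  | succ m ih =>
    intro u
    cases u with
    | nil => simp [pvStride_nil]
    | cons y v =>
      rw [pvStride_cons]
      simp only [List.drop_succ_cons]
      rw [ih (v.drop 1)]
      have h2 : (v.drop 1).drop (2 * m) = (y :: v).drop (2 * (m + 1)) := by
        rw [List.drop_drop]
        have he : 2 * (m + 1) = (2 * m + 1) + 1 := by ring
        rw [he, List.drop_succ_cons]
        congr 1
        omega
      rw [h2]

theorem pvStride_comp : ∀ s : List Char, ∀ m : Nat, pvStride m (pvStride 1 s) = pvStride (2 * m + 1) s := by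
  intro s
  induction hn : s.length using Nat.strong_induction_on generalizing s with
  | _ n ih =>
    intro m
    cases s with
    | nil => simp [pvStride_nil]
    | cons x t =>
      rw [pvStride_cons, pvStride_cons, pvStride_cons]
      congr 1
      have hdd : (t.drop 1).drop (2 * m) = t.drop (2 * m + 1) := by
        rw [List.drop_drop]
        congr 1
        omega
      rw [pvStride_drop_one m (t.drop 1), hdd]
      have hlen : (t.drop (2 * m + 1)).length < n := by
        subst hn
        simp only [List.length_drop, List.length_cons]
        omega
      exact ih _ hlen (t.drop (2 * m + 1)) rfl m

theorem pvStride_one_length : ∀ s : List Char, (pvStride 1 s).length = (s.length + 1) / 2 := by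
  intro s
  induction hn : s.length using Nat.strong_induction_on generalizing s with
  | _ n ih =>
    cases s with
    | nil =>
      rw [pvStride_nil]
      simp only [List.length_nil] at hn ⊢
      omega
    | cons x t =>
      cases t with
      | nil =>
        rw [pvStride_cons]
        simp only [List.length_cons, List.length_nil] at hn
        simp [pvStride_nil]
        omega
      | cons y u =>
        rw [pvStride_cons]
        simp only [List.drop_succ_cons, List.drop_zero, List.length_cons]
        simp only [List.length_cons] at hn
        have hlen : u.length < n := by omega
        rw [ih _ hlen u rfl]
        omega

theorem pvStride_take_one (m : Nat) (s : List Char) (h : s.length ≤ m + 1) : pvStride m s = s.take 1 := by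
  cases s with
  | nil => simp [pvStride_nil]
  | cons x t =>
    rw [pvStride_cons]
    have ht : t.drop m = [] := by
      apply List.drop_eq_nil_of_le
      simp at h
      omega
    rw [ht, pvStride_nil]
    simp

theorem pvFilterMap_eq_map {α β : Type} (l : List α) (f : α → β) (g : α → Option β)
    (h : ∀ a ∈ l, g a = some (f a)) : l.filterMap g = l.map f := by
  induction l with
  | nil => simp
  | cons x t ih =>
    simp only [List.filterMap_cons, List.map_cons]
    rw [h x (by simp)]
    rw [ih (fun a ha => h a (by simp [ha]))]

-- every m-th element gathered by filterMap over range c equals pvStride (m-1), as soon as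
-- m * c covers the list
theorem pvSel_eq_stride (m : Nat) (hm : 1 ≤ m) : ∀ (c : Nat) (s : List Char), s.length ≤ m * c →
    (List.range c).filterMap (fun j => s[m * j]?) = pvStride (m - 1) s := by
  intro c
  induction c with
  | zero =>
    intro s hs
    simp only [Nat.mul_zero, Nat.le_zero, List.length_eq_zero_iff] at hs
    simp [hs, pvStride_nil]
  | succ c ih =>
    intro s hs
    cases s with
    | nil =>
      simp [pvStride_nil]
    | cons x t =>
      rw [List.range_succ_eq_map, List.filterMap_cons]
      simp only [Nat.mul_zero, List.getElem?_cons_zero]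
      rw [List.filterMap_map]
      have hstep : (fun j : Nat => (x :: t)[m * j]?) ∘ Nat.succ = fun j : Nat => ((x :: t).drop m)[m * j]? := by
        funext j
        simp only [Function.comp_apply, List.getElem?_drop]
        congr 1
        rw [Nat.mul_succ]
        omega
      rw [hstep]
      have hr : m * (c + 1) = m * c + m := by ring
      rw [hr] at hs
      simp only [List.length_cons] at hs
      have hlen : ((x :: t).drop m).length ≤ m * c := by
        simp only [List.length_drop, List.length_cons]
        omega
      rw [ih _ hlen]
      rw [pvStride_cons]
      congr 1
      have ht : t.drop (m - 1) = (x :: t).drop m := by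
        cases m with
        | zero => omega
        | succ m' => simp
      rw [ht]

-- the even positions of range n
theorem pvRange_filter_even : ∀ n : Nat, (List.range n).filter (fun k => k % 2 == 0) =
    (List.range ((n + 1) / 2)).map (fun j => 2 * j) := by
  intro n
  induction n with
  | zero => simp
  | succ n ih =>
    rw [List.range_succ, List.filter_append, ih]
    by_cases h : n % 2 = 0
    · have h1 : (n + 1 + 1) / 2 = (n + 1) / 2 + 1 := by omega
      rw [h1, List.range_succ, List.map_append]
      congr 1
      have hp : (n % 2 == 0) = true := by simp [h]
      simp only [List.filter_cons, hp, if_true, List.filter_nil]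
      have hn2 : 2 * ((n + 1) / 2) = n := by omega
      simp [hn2]
    · have h1 : (n + 1 + 1) / 2 = (n + 1) / 2 := by omega
      rw [h1]
      have hp : (n % 2 == 0) = false := by simp [h]
      simp [hp]


-- A's pass is the stride-2 selection
theorem pvPassA_eq_stride (s : List Char) : pvPassA s = pvStride 1 s := by
  unfold pvPassA
  rw [PySem.List.foldl_append_if (fun i => PySem.Int.mod i 2 == 0) (fun i => PySem.List.pyGetD s i ' ')]
  rw [List.nil_append]
  rw [PySem.List.pyRange_one]
  rw [List.filter_map]
  have hp : ((fun i => PySem.Int.mod i 2 == 0) ∘ (fun k : Nat => (0 : Int) + ↑k)) = (fun k : Nat => k % 2 == 0) := by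
    funext k
    simp only [Function.comp_apply, zero_add]
    have hc : PySem.Int.mod (↑k) 2 = ((k % 2 : Nat) : Int) := by
      exact_mod_cast PySem.Int.mod_natCast k 2
    rw [hc]
    cases h : k % 2 == 0 <;> simp_all
  rw [hp]
  have hcast : ((s.length : Int) - 0).toNat = s.length := by omega
  rw [hcast, pvRange_filter_even s.length, List.map_map, List.map_map]
  have hsel := pvSel_eq_stride 2 (by omega) ((s.length + 1) / 2) s (by omega)
  rw [show (2 : Nat) - 1 = 1 from rfl] at hsel
  rw [← hsel]
  symm
  apply pvFilterMap_eq_map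
  intro j hj
  simp only [List.mem_range] at hj
  have hjlt : 2 * j < s.length := by omega
  rw [List.getElem?_eq_getElem hjlt]
  simp only [Function.comp_apply, zero_add]
  rw [PySem.List.pyGetD_natCast]
  congr 1
  rw [List.getD_eq_getElem?_getD, List.getElem?_eq_getElem hjlt]
  rfl

theorem pvIter_eq_stride : ∀ (j : Nat) (s : List Char), pvIter j s = pvStride (2 ^ j - 1) s := by
  intro j
  induction j with
  | zero =>
    intro s
    have : pvStride 0 s = s := by
      induction s with
      | nil => simp [pvStride_nil]
      | cons x t ih => rw [pvStride_cons]; simp [ih]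
    simp [pvIter, this]
  | succ j ih =>
    intro s
    show pvIter j (pvPassA s) = _
    rw [ih, pvPassA_eq_stride, pvStride_comp]
    congr 1
    have h1 : 1 ≤ 2 ^ j := Nat.one_le_two_pow
    have h2 : 2 ^ (j + 1) = 2 * 2 ^ j := by ring
    omega

-- A's loop in the `length == 0` case: exactly (factor - count) passes
theorem pvLoopA_zero (factor margin : Int) : ∀ (fuel : Nat) (s : List Char) (count : Int),
    (factor - count).toNat ≤ fuel →
    pvLoopA factor 0 margin fuel s count = pvIter (factor - count).toNat s := by
  intro fuel
  induction fuel with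
  | zero =>
    intro s count h
    have : (factor - count).toNat = 0 := by omega
    rw [this]
    rfl
  | succ fuel ih =>
    intro s count h
    rw [pvLoopA]
    by_cases hc : count < factor
    · simp only [hc, if_true, ne_eq, not_true_eq_false, false_and, if_false, if_true]
      rw [ih (pvPassA s) (count + 1) (by omega)]
      have : (factor - count).toNat = (factor - (count + 1)).toNat + 1 := by omega
      rw [this]
      rfl
    · simp only [hc, if_false]
      have : (factor - count).toNat = 0 := by omega
      rw [this]
      rfl

-- A's loop in the truthy-`length` case: pvCnt + 1 passes
theorem pvLoopA_ne (factor length margin : Int) (hf : 0 < factor) (hl : length ≠ 0)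
    (hT : 1 ≤ margin + length) : ∀ (fuel : Nat) (s : List Char), s.length + 1 ≤ fuel →
    pvLoopA factor length margin fuel s 0 = pvIter (pvCnt (margin + length) s.length + 1) s := by
  intro fuel
  induction fuel with
  | zero => intro s h; omega
  | succ fuel ih =>
    intro s h
    rw [pvLoopA]
    simp only [hf, if_true, hl, ne_eq, not_false_eq_true, true_and]
    by_cases hb : (s.length : Int) - length ≤ margin
    · rw [if_pos hb]
      rw [pvCnt_eq, if_pos (by omega)]
      rfl
    · rw [if_neg hb]
      have hn2 : 2 ≤ s.length := by omega
      have hlen : (pvPassA s).length = (s.length + 1) / 2 := by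
        rw [pvPassA_eq_stride, pvStride_one_length]
      rw [ih (pvPassA s) (by rw [hlen]; omega)]
      have hc : pvCnt (margin + length) s.length = pvCnt (margin + length) ((s.length + 1) / 2) + 1 := by
        rw [pvCnt_eq, if_neg (by omega), if_neg (by omega)]
      rw [hlen, hc]
      rfl

-- B's k loop computes 1 + pvCnt
theorem pvKLoop_eq_cnt (T : Int) : ∀ (fuel l : Nat) (k : Int),
    l + 1 ≤ fuel → ((l : Int) ≤ T ∨ 1 ≤ T) →
    pvKLoop T fuel l k = k + pvCnt T l := by
  intro fuel
  induction fuel with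
  | zero => intro l k h; omega
  | succ fuel ih =>
    intro l k h hg
    rw [pvKLoop]
    by_cases hb : T < (l : Int)
    · rw [if_pos hb]
      have hT1 : 1 ≤ T := by
        rcases hg with hg | hg
        · omega
        · exact hg
      have hl2 : 2 ≤ l := by omega
      rw [ih ((l + 1) / 2) (k + 1) (by omega) (by omega)]
      have hc : pvCnt T l = pvCnt T ((l + 1) / 2) + 1 := by
        rw [pvCnt_eq, if_neg (by omega), if_neg (by omega)]
      rw [hc]
      push_cast
      ring
    · rw [if_neg hb]
      rw [pvCnt_eq, if_pos (by omega)]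
      ring

theorem pvKLoop_ge (T : Int) : ∀ (fuel l : Nat) (k : Int), k ≤ pvKLoop T fuel l k := by
  intro fuel
  induction fuel with
  | zero => intro l k; simp [pvKLoop]
  | succ fuel ih =>
    intro l k
    rw [pvKLoop]
    by_cases hb : T < (l : Int)
    · rw [if_pos hb]
      have := ih ((l + 1) / 2) (k + 1)
      omega
    · rw [if_neg hb]

-- B's result, evaluated: with k passes it is the stride-2^k selection
theorem pvAlt_eq (dispersion : String) (factor length margin : Int) (hf : 0 < factor)
    (k : Int) (hk : k = if length = 0 then factor else pvKLoop (margin + length) (dispersion.toList.length + 1) dispersion.toList.length 1)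
    (hk1 : 1 ≤ k) :
    dispersion_reduce_alt dispersion factor length margin = String.ofList (pvStride (2 ^ k.toNat - 1) dispersion.toList) := by
  unfold dispersion_reduce_alt
  rw [if_neg (by omega)]
  simp only
  rw [← hk]
  set s := dispersion.toList with hs
  set n := s.length with hn
  by_cases hb : ((PySem.Int.bitLength (n : Int) : Int)) ≤ k
  · rw [if_pos hb]
    congr 1
    rw [PySem.List.slice_to s (show (0:Int) ≤ 1 by omega)]
    symm
    rw [pvStride_take_one]
    · rfl
    · have h1 : n < 2 ^ PySem.Int.bitLength (n : Int) := by
        have := PySem.Int.lt_two_pow_bitLength (n : Int)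
        simpa using this
      have h2 : (2 : Nat) ^ PySem.Int.bitLength (n : Int) ≤ 2 ^ k.toNat := by
        apply Nat.pow_le_pow_right (by omega)
        omega
      omega
  · rw [if_neg hb]
    congr 1
    -- evaluate the extended slice s[::2^k]
    have hkpos : (0 : Int) < (2 : Int) ^ k.toNat := by positivity
    have hm1 : (1 : Nat) ≤ 2 ^ k.toNat := Nat.one_le_two_pow
    have hcast : ((2 : Int) ^ k.toNat) = (((2 ^ k.toNat : Nat)) : Int) := by push_cast; ring
    set m : Nat := 2 ^ k.toNat with hm
    have hn1 : 1 ≤ n := by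
      by_contra hc
      have h0 : n = 0 := by omega
      have hbl : PySem.Int.bitLength ((0 : Nat) : Int) = 0 := by decide
      rw [h0, hbl] at hb
      simp at hb
      omega
    rw [PySem.List.slice?]
    rw [if_neg (by omega)]
    rw [PySem.List.sliceIndices]
    simp only [if_neg (show ¬((2:Int) ^ k.toNat < 0) by omega)]
    rw [if_pos (by omega : (0 : Int) < (2:Int) ^ k.toNat)]
    rw [if_pos (by omega : (0 : Int) < (n : Int))]
    simp only [Option.getD_some]
    have hcnt : (((n : Int) - 0 + (2:Int) ^ k.toNat - 1) / ((2:Int) ^ k.toNat)).toNat = (n + m - 1) / m := by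
      rw [hcast]
      have : ((n : Int) - 0 + ((m : Nat) : Int) - 1) = (((n + m - 1 : Nat)) : Int) := by omega
      rw [this]
      rw [← Int.natCast_ediv]
      exact Int.toNat_natCast _
    rw [hcnt]
    have harg : ∀ j : Nat, ((0 : Int) + (2:Int) ^ k.toNat * (j : Nat)).toNat = m * j := by
      intro j
      rw [hcast]
      omega
    have hfn : (fun j : Nat => s[((0 : Int) + (2:Int) ^ k.toNat * (j : Nat)).toNat]?) = (fun j : Nat => s[m * j]?) := by
      funext j
      rw [harg j]
    rw [hfn]
    rw [pvSel_eq_stride m hm1 ((n + m - 1) / m) s ?hcov]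
    case hcov =>
      have key : m * ((n + m - 1) / m) + (n + m - 1) % m = n + m - 1 := Nat.div_add_mod _ _
      have hmod : (n + m - 1) % m < m := Nat.mod_lt _ (by omega)
      have hgen : ∀ p : Nat, m * ((n + m - 1) / m) = p → n ≤ p := by
        intro p hp
        rw [hp] at key
        omega
      exact hgen _ rfl

-- ===== VERDICT (by name: the statement is the Claim_ definition above) =====
theorem dispersion_reduce_spec : Claim_equal_dispersion_reduce := by
  intro dispersion factor length margin hdom hpre
  unfold Spec_dispersion_reduce
  unfold dispersion_reduce
  by_cases hf : factor ≤ 0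
  · -- no pass at all
    rw [pvLoopA]
    rw [if_neg (by omega)]
    unfold dispersion_reduce_alt
    rw [if_pos hf]
    exact String.ofList_toList
  · have hf' : 0 < factor := by omega
    by_cases hl : length = 0
    · -- count-down case: factor passes
      subst hl
      rw [pvLoopA_zero factor margin _ dispersion.toList 0 (by omega)]
      rw [pvAlt_eq dispersion factor 0 margin hf' factor (by simp) (by omega)]
      rw [pvIter_eq_stride]
      simp
    · -- truthy length: pvCnt + 1 passes on both sides
      by_cases hT1 : 1 ≤ margin + length
      · rw [pvLoopA_ne factor length margin hf' hl hT1 _ dispersion.toList (by omega)]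
        have hkeq : pvKLoop (margin + length) (dispersion.toList.length + 1) dispersion.toList.length 1
            = 1 + (pvCnt (margin + length) dispersion.toList.length : Int) :=
          pvKLoop_eq_cnt (margin + length) _ _ _ (by omega) (Or.inr hT1)
        rw [pvAlt_eq dispersion factor length margin hf' _ (by rw [if_neg hl]) (pvKLoop_ge _ _ _ _)]
        rw [pvIter_eq_stride]
        have hk2 : (pvKLoop (margin + length) (dispersion.toList.length + 1) dispersion.toList.length 1).toNat
            = pvCnt (margin + length) dispersion.toList.length + 1 := by
          rw [hkeq]
          omega
        rw [hk2]
      · -- the remaining Pre_ case: empty string with 0 ≤ margin + length (< 1):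
        -- A breaks after one pass on the empty list; B takes one pass as well
        have hE : dispersion = "" ∧ 0 ≤ margin + length := by
          unfold Pre_dispersion_reduce at hpre
          rcases hpre with hh | hh | hh | hh
          · omega
          · exact absurd hh hl
          · omega
          · exact hh
        obtain ⟨hE1, hE2⟩ := hE
        subst hE1
        rw [pvLoopA]
        rw [if_pos (show (0:Int) < factor from hf')]
        rw [if_pos ⟨hl, by simp; omega⟩]
        rw [pvAlt_eq "" factor length margin hf' _ (by rw [if_neg hl]) (pvKLoop_ge _ _ _ _)]
        congr 1
        rw [pvPassA_eq_stride]
        have hnil : ("" : String).toList = ([] : List Char) := rfl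
        rw [hnil, pvStride_nil, pvStride_nil]
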